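-- pv_equiv track=rewrite | github.com/Bill-Mo/CSA_Project | code/helper.py | int_to_bitstr
-- ===== SOURCE A (Python) =====
-- def int_to_bitstr(bit: int) ->str:
--     '''
--
--     Convert a int to a 32 bits binary srting and pad zeros in the front.
--
--     '''
--     if not isinstance(bit, int):
--         if isinstance(bit, str):
--             while len(bit) < 32:
--                 bit = '0' + bit
--             return bit
--         else:
--             raise Exception('The input is neither a int nor a string')
--     if bit < 0 :
--         reverse_bit = -bit - 1
--         reverse_bitstr = bin(reverse_bit)[2:]
--         bitstr = ''
--         for bit in reverse_bitstr:
--             if bit == '1':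
--                 bitstr += '0'
--             else:
--                 bitstr += '1'
--
--         if len(bitstr) > 32:
--             bitstr = bitstr[-32:]
--         while len(bitstr) < 32:
--             bitstr = '1' + bitstr
--     else:
--         bitstr = bin(bit)[2:]
--         if len(bitstr) > 32:
--             bitstr = bitstr[-32:]
--
--         while len(bitstr) < 32:
--             bitstr = '0' + bitstr
--     return bitstr
-- ===== SOURCE B (Python) =====
-- def int_to_bitstr(bit: int) -> str:
--     '''Convert an int to a 32-bit two's-complement binary string (padded).'''
--     if isinstance(bit, int):
--         return format(bit & 0xFFFFFFFF, '032b')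
--     if isinstance(bit, str):
--         return bit.rjust(32, '0')
--     raise Exception('The input is neither a int nor a string')
-- ===== Notes on version B (the rewrite author's own statement) =====
-- stated objective: idiomatic
-- what changed: Replaces the manual negative-case bit-flipping loop, last-32 truncation and while-loop padding with a single masked closed form format(bit & 0xFFFFFFFF, '032b'); the str branch pads with rjust instead of a while loop.
import Mathlib
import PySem

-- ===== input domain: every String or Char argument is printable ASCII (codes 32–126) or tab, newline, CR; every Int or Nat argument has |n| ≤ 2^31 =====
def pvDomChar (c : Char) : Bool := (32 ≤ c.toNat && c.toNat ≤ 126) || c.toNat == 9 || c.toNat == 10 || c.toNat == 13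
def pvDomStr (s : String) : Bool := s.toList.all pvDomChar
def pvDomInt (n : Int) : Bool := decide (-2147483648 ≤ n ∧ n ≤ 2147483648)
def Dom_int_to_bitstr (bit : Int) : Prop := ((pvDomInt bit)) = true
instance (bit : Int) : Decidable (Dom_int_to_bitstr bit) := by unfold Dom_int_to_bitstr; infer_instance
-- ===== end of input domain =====

-- B replaces A's manual flip/truncate/pad loops with the masked closed form
-- format(bit & 0xFFFFFFFF, '032b'); same cost, more idiomatic.
-- (Only the int branch is portable under the type convention: the signature is Int → String,
-- so A's str branch and its raise branch are unreachable here; both are preserved in Source B.)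

-- ===== PORT A =====

-- bin(n)[2:] for n > 0 (MSB first); returns [] for n = 0
def pvBinAux : Nat → List Char := fun n =>
  if n = 0 then [] else pvBinAux (n / 2) ++ [if n % 2 = 1 then '1' else '0']
decreasing_by exact Nat.div_lt_self (Nat.pos_of_ne_zero (by assumption)) (by norm_num)

-- bin(n)[2:] for n ≥ 0 (bin(0)[2:] = "0")
def pvBin (n : Nat) : List Char := if n = 0 then ['0'] else pvBinAux n

def pvFlip (c : Char) : Char := if c = '1' then '0' else '1'

-- A's `while len(bitstr) < 32: bitstr = c + bitstr`
def pvPadA (c : Char) (l : List Char) : List Char :=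
  if l.length < 32 then pvPadA c (c :: l) else l
termination_by 32 - l.length
decreasing_by simp_all; omega

-- A's `bitstr[-32:]` applied only when len > 32
def pvTrunc (l : List Char) : List Char :=
  if l.length > 32 then l.drop (l.length - 32) else l

def int_to_bitstr (bit : Int) : String :=
  if bit < 0 then
    -- reverse_bit = -bit - 1; flip each char of bin(reverse_bit)[2:]; truncate; pad '1's
    let reverse_bitstr := pvBin (-bit - 1).toNat
    let bitstr := reverse_bitstr.foldl (fun acc c => acc ++ [pvFlip c]) []
    String.mk (pvPadA '1' (pvTrunc bitstr))
  else
    let bitstr := pvBin bit.toNat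
    String.mk (pvPadA '0' (pvTrunc bitstr))

-- ===== PORT B =====

-- format(m, '032b') = binary digits of m, left-padded with '0' to width 32
def pvFormat032b (m : Nat) : List Char :=
  let ds := pvBin m
  List.replicate (32 - ds.length) '0' ++ ds

def int_to_bitstr_alt (bit : Int) : String :=
  String.mk (pvFormat032b (PySem.Int.mod bit 4294967296).toNat)

-- ===== PRECONDITION & SPEC =====
def Spec_int_to_bitstr (bit : Int) (out : String) : Prop := out = int_to_bitstr_alt bit
instance (bit : Int) (out : String) : Decidable (Spec_int_to_bitstr bit out) := by unfold Spec_int_to_bitstr; infer_instance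

-- ===== CLAIM (what is proved, stated in full; the proofs are below) =====
def Claim_equal_int_to_bitstr : Prop := ∀ (bit : Int), Dom_int_to_bitstr bit → Spec_int_to_bitstr bit (int_to_bitstr bit)

-- ===== LEMMAS AND PROOFS =====

-- fixed-width binary, MSB first
def pvBitsW : Nat → Nat → List Char
  | 0, _ => []
  | w + 1, n => pvBitsW w (n / 2) ++ [if n % 2 = 1 then '1' else '0']

theorem pvBitsW_length (w n : Nat) : (pvBitsW w n).length = w := by
  induction w generalizing n with
  | zero => rfl
  | succ w ih => simp [pvBitsW, ih]

theorem pvBitsW_eq_pad (w n : Nat) (h : n < 2 ^ w) :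
    pvBitsW w n = List.replicate (w - (pvBinAux n).length) '0' ++ pvBinAux n := by
  induction w generalizing n with
  | zero =>
    interval_cases n
    simp [pvBitsW, pvBinAux]
  | succ w ih =>
    have hdiv : n / 2 < 2 ^ w := by
      have h2 : 2 ^ (w + 1) = 2 * 2 ^ w := by ring
      omega
    by_cases hn : n = 0
    · subst hn
      simp [pvBitsW, ih 0 (by positivity), pvBinAux, List.replicate_succ' (n := w)]
    · rw [pvBitsW, ih _ hdiv]
      conv_rhs => rw [pvBinAux]
      simp only [hn, ite_false]
      have hle : (pvBinAux (n / 2)).length ≤ w := by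
        have := congrArg List.length (ih _ hdiv)
        simp [pvBitsW_length] at this
        omega
      rw [show w + 1 - (pvBinAux (n / 2) ++ [if n % 2 = 1 then '1' else '0']).length = w - (pvBinAux (n / 2)).length from by simp only [List.length_append, List.length_cons, List.length_nil]; omega]
      simp [List.append_assoc]

theorem pvBinAux_length_le (w n : Nat) (h : n < 2 ^ w) : (pvBinAux n).length ≤ w := by
  have := congrArg List.length (pvBitsW_eq_pad w n h)
  simp [pvBitsW_length] at this
  omega

theorem pvBitsW_compl (w r : Nat) (h : r < 2 ^ w) :
    pvBitsW w (2 ^ w - 1 - r) = (pvBitsW w r).map pvFlip := by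
  induction w generalizing r with
  | zero => rfl
  | succ w ih =>
    have h2 : 2 ^ (w + 1) = 2 * 2 ^ w := by ring
    have hdiv : (2 ^ (w + 1) - 1 - r) / 2 = 2 ^ w - 1 - r / 2 := by omega
    have hmod : (2 ^ (w + 1) - 1 - r) % 2 = 1 - r % 2 := by omega
    have hr2 : r / 2 < 2 ^ w := by omega
    simp only [pvBitsW, hdiv, hmod, ih _ hr2, List.map_append, List.map]
    congr 1
    have : r % 2 = 0 ∨ r % 2 = 1 := by omega
    rcases this with h | h <;> simp [h, pvFlip]

theorem pvPadA_eq (c : Char) (l : List Char) :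
    pvPadA c l = List.replicate (32 - l.length) c ++ l := by
  by_cases h : l.length < 32
  · rw [pvPadA]
    simp only [h, if_pos]
    rw [pvPadA_eq c (c :: l)]
    rw [show 32 - l.length = (32 - (c :: l).length) + 1 from by simp only [List.length_append, List.length_cons, List.length_nil]; omega]
    simp [List.replicate_succ']
  · rw [pvPadA]
    simp [h]; omega
termination_by 32 - l.length
decreasing_by simp_all; omega

theorem pvFoldl_flip (l acc : List Char) :
    l.foldl (fun acc c => acc ++ [pvFlip c]) acc = acc ++ l.map pvFlip := by
  induction l generalizing acc with
  | nil => simp [List.foldl]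
  | cons x xs ih => simp [List.foldl, ih]

theorem pvBin_length_le (w n : Nat) (hw : 1 ≤ w) (h : n < 2 ^ w) : (pvBin n).length ≤ w := by
  by_cases hn : n = 0
  · simp [pvBin, hn]; omega
  · simpa [pvBin, hn] using pvBinAux_length_le w n h

-- ===== VERDICT (by name: the statement is the Claim_ definition above) =====
theorem int_to_bitstr_spec : Claim_equal_int_to_bitstr := by
  intro bit hdom
  have hb : -2147483648 ≤ bit ∧ bit ≤ 2147483648 := by
    simpa [Dom_int_to_bitstr, pvDomInt] using hdom
  unfold Spec_int_to_bitstr int_to_bitstr int_to_bitstr_alt pvFormat032b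
  have hmod : PySem.Int.mod bit 4294967296 = bit % 4294967296 :=
    PySem.Int.mod_eq_emod_of_pos (by norm_num)
  by_cases hneg : bit < 0
  · -- negative branch
    simp only [hneg, if_pos]
    set r : Nat := (-bit - 1).toNat with hr
    have hrlt : r < 2 ^ 31 := by omega
    have hrlt32 : r < 2 ^ 32 := by omega
    have hm : (PySem.Int.mod bit 4294967296).toNat = 2 ^ 32 - 1 - r := by
      rw [hmod]; omega
    rw [hm, pvFoldl_flip, List.nil_append]
    -- the truncation branch is dead: the flipped string has at most 31 chars
    have hlen : ((pvBin r).map pvFlip).length ≤ 31 := by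
      simpa using pvBin_length_le 31 r (by norm_num) hrlt
    have htr : pvTrunc ((pvBin r).map pvFlip) = (pvBin r).map pvFlip := by
      unfold pvTrunc
      split
      · exact absurd ‹_› (by omega)
      · rfl
    rw [htr, pvPadA_eq]
    -- B's side: m ≠ 0, rewrite through pvBitsW
    have hmne : 2 ^ 32 - 1 - r ≠ 0 := by omega
    have hmlt : 2 ^ 32 - 1 - r < 2 ^ 32 := by omega
    have hB : List.replicate (32 - (pvBin (2 ^ 32 - 1 - r)).length) '0' ++ pvBin (2 ^ 32 - 1 - r)
        = pvBitsW 32 (2 ^ 32 - 1 - r) := by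
      rw [pvBitsW_eq_pad 32 _ hmlt]
      simp [pvBin, show (4294967295 : Nat) - r ≠ 0 from by omega]
    rw [hB, pvBitsW_compl 32 r hrlt32, pvBitsW_eq_pad 32 r hrlt32]
    by_cases hr0 : r = 0
    · simp only [hr0]
      simp [pvBin, pvBinAux, pvFlip, List.replicate_succ']
    · simp [pvBin, hr0, List.map_replicate, pvFlip]
  · -- nonnegative branch
    simp only [hneg, ite_false]
    have hm : (PySem.Int.mod bit 4294967296).toNat = bit.toNat := by
      rw [hmod]; omega
    have hlen : (pvBin bit.toNat).length ≤ 32 :=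
      pvBin_length_le 32 bit.toNat (by norm_num) (by omega)
    have htr : pvTrunc (pvBin bit.toNat) = pvBin bit.toNat := by
      unfold pvTrunc
      split
      · exact absurd ‹_› (by omega)
      · rfl
    rw [hm, htr, pvPadA_eq]
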